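-- pv_equiv track=rewrite | github.com/vaaliferov/161_lemma | src/lemma/split.py | get_stem
-- ===== SOURCE A (Python) =====
-- def get_stem(words):
--
--     stem = ''
--
--     if len(words) == 0: return ''
--     if len(words[0]) == 0: return ''
--     if len(words) == 1: return words[0]
--
--     c = lambda s: all(s in x for x in words)
--
--     for i in range(len(words[0])):
--         for j in range(len(words[0])-i+1):
--             if j > len(stem) and c(words[0][i:i+j]):
--                 stem = words[0][i:i+j]
--
--     return stem
-- ===== SOURCE B (Python) =====
-- def get_stem(words):
--     if not words or not words[0]:
--         return ''
--     w0 = words[0]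
--     for k in range(len(w0), 0, -1):
--         for i in range(len(w0) - k + 1):
--             sub = w0[i:i+k]
--             if all(sub in x for x in words):
--                 return sub
--     return ''
-- ===== Notes on version B (the rewrite author's own statement) =====
-- stated objective: alternative
-- what changed: A grows the longest common-to-all substring bottom-up by scanning every (start, length) pair of words[0] and keeping the longest hit in an accumulator; B scans candidate lengths top-down from len(words[0]) to 1 and returns the first (leftmost) common substring found, with no accumulator.
import Mathlib
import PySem

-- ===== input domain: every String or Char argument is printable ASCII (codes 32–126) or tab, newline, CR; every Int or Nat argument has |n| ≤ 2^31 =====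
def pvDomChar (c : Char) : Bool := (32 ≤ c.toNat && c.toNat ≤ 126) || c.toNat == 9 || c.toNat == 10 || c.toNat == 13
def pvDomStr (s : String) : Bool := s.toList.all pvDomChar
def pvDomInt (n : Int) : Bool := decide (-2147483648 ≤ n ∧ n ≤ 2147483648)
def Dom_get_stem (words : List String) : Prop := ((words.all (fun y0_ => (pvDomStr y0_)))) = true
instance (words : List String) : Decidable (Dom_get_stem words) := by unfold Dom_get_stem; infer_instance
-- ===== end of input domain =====

-- B replaces A's bottom-up grow-the-stem double loop (all lengths, all starts, keep the longest so far)
-- by a top-down scan over lengths k = len(w0)..1 returning the first common substring found (early return);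
-- objective: alternative decomposition of the same search; return values are proved identical.


-- ===== PORT A =====
def get_stem (words : List String) : String :=
  if words.length = 0 then ""
  else
    -- words[0] (guarded: words is nonempty here)
    let w0 := words.headD ""
    if PySem.Str.len w0 = 0 then ""
    else if words.length = 1 then w0
    else
      let c := fun (s : String) => words.all (fun x => PySem.Str.isIn s x)
      (PySem.List.pyRange 0 (PySem.Str.len w0) 1).foldl (fun stem i =>
        (PySem.List.pyRange 0 (PySem.Str.len w0 - i + 1) 1).foldl (fun stem j =>
          if j > PySem.Str.len stem ∧ c (PySem.Str.slice w0 (some i) (some (i + j))) = true then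
            PySem.Str.slice w0 (some i) (some (i + j))
          else stem) stem) ""

-- ===== PORT B =====
-- inner 'for i in …: if all(sub in x …): return sub' loop of Source B
def pvAltFind (words : List String) (w0 : String) (k : Int) : List Int → Option String
  | [] => none
  | i :: rest =>
    let sub := PySem.Str.slice w0 (some i) (some (i + k))
    if words.all (fun x => PySem.Str.isIn sub x) then some sub
    else pvAltFind words w0 k rest

-- outer 'for k in range(len(w0), 0, -1)' loop of Source B (early return = Option)
def pvAltScan (words : List String) (w0 : String) : List Int → String
  | [] => ""
  | k :: rest =>
    match pvAltFind words w0 k (PySem.List.pyRange 0 (PySem.Str.len w0 - k + 1) 1) with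
    | some s => s
    | none => pvAltScan words w0 rest

def get_stem_alt (words : List String) : String :=
  match words with
  | [] => ""
  | w0 :: _ =>
    if PySem.Str.len w0 = 0 then ""
    else pvAltScan words w0 (PySem.List.pyRange (PySem.Str.len w0) 0 (-1))

-- ===== PRECONDITION & SPEC =====
def Spec_get_stem (words : List String) (out : String) : Prop := out = get_stem_alt words
instance (words : List String) (out : String) : Decidable (Spec_get_stem words out) := by unfold Spec_get_stem; infer_instance

-- ===== CLAIM (what is proved, stated in full; the proofs are below) =====
def Claim_equal_get_stem : Prop := ∀ (words : List String), Dom_get_stem words → Spec_get_stem words (get_stem words)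

-- ===== LEMMAS AND PROOFS =====

-- 'sub in x for all x in words' for the substring of w0 of start i and length j (char-list level)
def pvCb (words : List String) (cs : List Char) (i j : Nat) : Bool :=
  words.all fun x => PySem.Chars.isIn ((cs.drop i).take j) x.toList

-- longest j ≤ |cs| - i such that cs[i:i+j] is common to all words
def pvM (words : List String) (cs : List Char) (i : Nat) : Nat :=
  Nat.findGreatest (fun j => pvCb words cs i j = true) (cs.length - i)

def pvSub (w0 : String) (i j : Nat) : String :=
  PySem.Str.slice w0 (some (i : Int)) (some ((i : Int) + (j : Int)))

-- invariant of A's outer loop after starts 0..t-1, and characterization of the common result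
def pvInv (words : List String) (w0 : String) (t : Nat) (s : String) : Prop :=
  (s = "" ∧ ∀ i < t, pvM words w0.toList i = 0) ∨
  (∃ i < t, 1 ≤ pvM words w0.toList i ∧ s = pvSub w0 i (pvM words w0.toList i) ∧
     (∀ i' < t, pvM words w0.toList i' ≤ pvM words w0.toList i) ∧
     (∀ i' < i, pvM words w0.toList i' < pvM words w0.toList i))

theorem pvSub_toList (w0 : String) (i j : Nat) :
    (pvSub w0 i j).toList = (w0.toList.drop i).take j := by
  rw [pvSub, PySem.Str.toList_slice, PySem.Chars.slice_eq_listSlice,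
    PySem.List.slice_toNat _ (by positivity) (by positivity)]
  congr 1
  omega

theorem pvSub_len (w0 : String) (i j : Nat) (h : j ≤ w0.toList.length - i) :
    (pvSub w0 i j).toList.length = j := by
  rw [pvSub_toList]
  simp only [List.length_take, List.length_drop]
  omega

theorem pvCb_zero (words : List String) (cs : List Char) (i : Nat) :
    pvCb words cs i 0 = true := by
  simp [pvCb, PySem.Chars.isIn_nil]

theorem pvCb_mono (words : List String) (cs : List Char) (i j j' : Nat)
    (hle : j' ≤ j) (h : pvCb words cs i j = true) : pvCb words cs i j' = true := by
  simp only [pvCb, List.all_eq_true] at h ⊢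
  intro x hx
  have h2 := h x hx
  rw [PySem.Chars.isIn_iff_infix] at h2 ⊢
  exact (List.take_prefix_take_left hle).isInfix.trans h2

theorem pvM_le (words : List String) (cs : List Char) (i : Nat) :
    pvM words cs i ≤ cs.length - i := by
  unfold pvM
  exact Nat.findGreatest_le _

theorem pvCb_pvM (words : List String) (cs : List Char) (i : Nat) :
    pvCb words cs i (pvM words cs i) = true := by
  unfold pvM
  exact Nat.findGreatest_spec (P := fun j => pvCb words cs i j = true)
    (Nat.zero_le _) (pvCb_zero words cs i)

theorem le_pvM (words : List String) (cs : List Char) (i j : Nat)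
    (hle : j ≤ cs.length - i) (h : pvCb words cs i j = true) : j ≤ pvM words cs i := by
  unfold pvM
  exact Nat.le_findGreatest (P := fun j => pvCb words cs i j = true) hle h

-- the port-level membership test equals pvCb
theorem pv_test_eq (words : List String) (w0 : String) (i j : Nat) :
    (words.all fun x =>
      PySem.Str.isIn (PySem.Str.slice w0 (some (i : Int)) (some ((i : Int) + (j : Int)))) x)
      = pvCb words w0.toList i j := by
  rw [pvCb]
  congr 1
  funext x
  rw [PySem.Str.isIn_eq, ← pvSub_toList, pvSub]

-- A's inner loop: grow the stem over j = 0..t-1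
theorem pvA_inner (words : List String) (w0 : String) (iN : Nat) (s : String) (t : Nat)
    (ht : t ≤ w0.toList.length - iN + 1) :
    ((List.range t).map (fun (k : Nat) => (k : Int))).foldl (fun stem j =>
        if j > PySem.Str.len stem ∧
            (words.all (fun x => PySem.Str.isIn (PySem.Str.slice w0 (some (iN : Int)) (some ((iN : Int) + j))) x)) = true then
          PySem.Str.slice w0 (some (iN : Int)) (some ((iN : Int) + j))
        else stem) s
    = if s.toList.length < min (t - 1) (pvM words w0.toList iN) then
        pvSub w0 iN (min (t - 1) (pvM words w0.toList iN))
      else s := by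
  induction t with
  | zero => simp
  | succ t ih =>
    rw [List.range_succ, List.map_append, List.foldl_append, ih (by omega)]
    simp only [List.map_cons, List.map_nil, List.foldl_cons, List.foldl_nil]
    have hmle : pvM words w0.toList iN ≤ w0.toList.length - iN := pvM_le words w0.toList iN
    rw [pv_test_eq]
    by_cases hC : pvCb words w0.toList iN t = true
    · have htm : t ≤ pvM words w0.toList iN := le_pvM _ _ _ _ (by omega) hC
      by_cases h1 : s.toList.length < min (t - 1) (pvM words w0.toList iN)
      · rw [if_pos h1]
        have hlen : (pvSub w0 iN (min (t - 1) (pvM words w0.toList iN))).toList.length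
            = min (t - 1) (pvM words w0.toList iN) := pvSub_len _ _ _ (by omega)
        have ht1 : 1 ≤ t := by omega
        rw [if_pos ⟨by rw [PySem.Str.len_eq, hlen]; exact_mod_cast (by omega : min (t - 1) (pvM words w0.toList iN) < t), hC⟩,
          if_pos (by omega : s.toList.length < min (t + 1 - 1) (pvM words w0.toList iN))]
        have : min (t + 1 - 1) (pvM words w0.toList iN) = t := by omega
        rw [this, pvSub]
      · rw [if_neg h1]
        by_cases h2 : s.toList.length < t
        · rw [if_pos ⟨by rw [PySem.Str.len_eq]; exact_mod_cast h2, hC⟩,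
            if_pos (by omega : s.toList.length < min (t + 1 - 1) (pvM words w0.toList iN))]
          have : min (t + 1 - 1) (pvM words w0.toList iN) = t := by omega
          rw [this, pvSub]
        · rw [if_neg (by
              rintro ⟨hgt, -⟩
              rw [PySem.Str.len_eq] at hgt
              exact h2 (by exact_mod_cast hgt)),
            if_neg (by omega : ¬ s.toList.length < min (t + 1 - 1) (pvM words w0.toList iN))]
    · have hmt : pvM words w0.toList iN < t := by
        by_contra hh
        rw [not_lt] at hh
        exact hC (pvCb_mono words w0.toList iN (pvM words w0.toList iN) t hh
          (pvCb_pvM words w0.toList iN))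
      rw [if_neg (by rintro ⟨-, h2⟩; exact hC h2)]
      have : min (t + 1 - 1) (pvM words w0.toList iN) = min (t - 1) (pvM words w0.toList iN) := by
        omega
      rw [this]

-- one outer step of A updates the invariant
theorem pvStep (words : List String) (w0 : String) (t : Nat) (r : String)
    (h : pvInv words w0 t r) :
    pvInv words w0 (t + 1)
      (if r.toList.length < pvM words w0.toList t then pvSub w0 t (pvM words w0.toList t) else r) := by
  rcases h with ⟨hre, hall⟩ | ⟨i1, hi1, h1le, hs, hmax, hstrict⟩
  · subst hre
    by_cases hm : 1 ≤ pvM words w0.toList t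
    · rw [if_pos (by simpa using hm)]
      right
      exact ⟨t, by omega, hm, rfl, fun i' hi' => by
          rcases Nat.lt_succ_iff_lt_or_eq.mp hi' with h | h
          · simp [hall i' h]
          · subst h; exact le_refl _,
        fun i' hi' => by simp [hall i' hi']; omega⟩
    · rw [if_neg (by simpa using hm)]
      left
      refine ⟨rfl, fun i hi => ?_⟩
      rcases Nat.lt_succ_iff_lt_or_eq.mp hi with h | h
      · exact hall i h
      · subst h; omega
  · have hlen : r.toList.length = pvM words w0.toList i1 := by
      rw [hs]; exact pvSub_len _ _ _ (pvM_le words w0.toList i1)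
    by_cases hc : r.toList.length < pvM words w0.toList t
    · rw [if_pos hc]
      rw [hlen] at hc
      right
      exact ⟨t, by omega, by omega, rfl, fun i' hi' => by
          rcases Nat.lt_succ_iff_lt_or_eq.mp hi' with h | h
          · exact le_trans (hmax i' h) (le_of_lt hc)
          · subst h; exact le_refl _,
        fun i' hi' => lt_of_le_of_lt (hmax i' hi') hc⟩
    · rw [if_neg hc]
      rw [hlen] at hc
      right
      refine ⟨i1, by omega, h1le, hs, fun i' hi' => ?_, hstrict⟩
      rcases Nat.lt_succ_iff_lt_or_eq.mp hi' with h | h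
      · exact hmax i' h
      · subst h; omega

-- A's outer loop preserves pvInv
theorem pvA_outer (words : List String) (w0 : String) (t : Nat)
    (ht : t ≤ w0.toList.length) :
    pvInv words w0 t
      (((List.range t).map (fun (k : Nat) => (k : Int))).foldl (fun stem i =>
        (PySem.List.pyRange 0 (PySem.Str.len w0 - i + 1) 1).foldl (fun stem j =>
          if j > PySem.Str.len stem ∧
              (words.all (fun x => PySem.Str.isIn (PySem.Str.slice w0 (some i) (some (i + j))) x)) = true then
            PySem.Str.slice w0 (some i) (some (i + j))
          else stem) stem) "") := by
  induction t with
  | zero =>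
    left
    refine ⟨by simp, by omega⟩
  | succ t ih =>
    rw [List.range_succ, List.map_append, List.foldl_append]
    simp only [List.map_cons, List.map_nil, List.foldl_cons, List.foldl_nil]
    have harg : PySem.Str.len w0 - ((t : Nat) : Int) + 1
        = ((w0.toList.length - t + 1 : Nat) : Int) := by
      rw [PySem.Str.len_eq]; push_cast [Nat.sub_add_cancel]; omega
    rw [harg, PySem.List.pyRange_zero_nat, pvA_inner words w0 t _ _ (le_refl _)]
    have hmin : min (w0.toList.length - t + 1 - 1) (pvM words w0.toList t)
        = pvM words w0.toList t := by
      have := pvM_le words w0.toList t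
      omega
    rw [hmin]
    exact pvStep words w0 t _ (ih (by omega))

-- B's inner loop is a find?
theorem pvAltFind_eq (words : List String) (w0 : String) (k : Int) (l : List Int) :
    pvAltFind words w0 k l
      = (l.find? (fun i => words.all fun x => PySem.Str.isIn (PySem.Str.slice w0 (some i) (some (i + k))) x)).map
          (fun i => PySem.Str.slice w0 (some i) (some (i + k))) := by
  induction l with
  | nil => rfl
  | cons i rest ih =>
    rw [pvAltFind, List.find?_cons]
    cases hc : (words.all fun x =>
        PySem.Str.isIn (PySem.Str.slice w0 (some i) (some (i + k))) x)
    · simp only [Bool.false_eq_true, ite_false, ih]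
    · simp only [ite_true, Option.map_some]

-- find? on a range: first hit, everything earlier misses
theorem pv_find_range {p : Nat → Bool} {t i0 : Nat}
    (h : (List.range t).find? p = some i0) :
    p i0 = true ∧ i0 < t ∧ ∀ i < i0, p i = false := by
  refine ⟨List.find?_some h, List.mem_range.mp (List.mem_of_find?_eq_some h), ?_⟩
  obtain ⟨hp, as, bs, hdec, hmiss⟩ := List.find?_eq_some_iff_append.mp h
  intro i hi
  have hpw : (as ++ i0 :: bs).Pairwise (· < ·) := hdec ▸ List.pairwise_lt_range
  have hmem : i ∈ List.range t := List.mem_range.mpr (by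
    have := List.mem_range.mp (List.mem_of_find?_eq_some h); omega)
  rw [hdec, List.mem_append] at hmem
  rcases hmem with hmem | hmem
  · simpa using hmiss i hmem
  · rcases List.mem_cons.mp hmem with rfl | hmem
    · omega
    · have := (List.pairwise_cons.mp (List.pairwise_append.mp hpw).2.1).1 i hmem
      omega

-- B's outer loop: descending over k, with everything above kk already known hopeless
theorem pvB_scan (words : List String) (w0 : String) (kk : Nat)
    (hkk : kk ≤ w0.toList.length)
    (hcap : ∀ i, pvM words w0.toList i ≤ kk) :
    pvInv words w0 w0.toList.length
      (pvAltScan words w0 (PySem.List.pyRange (kk : Int) 0 (-1))) := by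
  induction kk with
  | zero =>
    rw [show ((0 : Nat) : Int) = 0 by norm_num, PySem.List.pyRange_neg_one_eq_nil (by omega)]
    rw [pvAltScan]
    left
    exact ⟨rfl, fun i _ => by have := hcap i; omega⟩
  | succ kk ih =>
    rw [PySem.List.pyRange_neg_one_cons (by exact_mod_cast Nat.succ_pos kk), pvAltScan]
    have hk1 : ((kk + 1 : Nat) : Int) - 1 = ((kk : Nat) : Int) := by push_cast; ring
    have harg : PySem.Str.len w0 - ((kk + 1 : Nat) : Int) + 1
        = ((w0.toList.length - (kk + 1) + 1 : Nat) : Int) := by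
      rw [PySem.Str.len_eq]; push_cast [Nat.sub_add_cancel]; omega
    rw [hk1, harg, PySem.List.pyRange_zero_nat, pvAltFind_eq, List.find?_map]
    have hrange : w0.toList.length - (kk + 1) + 1 = w0.toList.length - kk := by omega
    rw [hrange]
    rcases hfind : (List.range (w0.toList.length - kk)).find?
        ((fun i => words.all fun x =>
            PySem.Str.isIn (PySem.Str.slice w0 (some i) (some (i + ((kk + 1 : Nat) : Int)))) x)
          ∘ (fun (k : Nat) => ((k : Nat) : Int))) with _ | i0
    · simp only [Option.map_none]
      apply ih (by omega)
      intro i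
      by_contra hgt
      rw [not_le] at hgt
      have hle : kk + 1 ≤ pvM words w0.toList i := by omega
      have hin : kk + 1 ≤ w0.toList.length - i := le_trans hle (pvM_le words w0.toList i)
      have hcb : pvCb words w0.toList i (kk + 1) :=
        pvCb_mono words w0.toList i _ _ hle (pvCb_pvM words w0.toList i)
      have hmem : i ∈ List.range (w0.toList.length - kk) := List.mem_range.mpr (by omega)
      have := List.find?_eq_none.mp hfind i hmem
      rw [Function.comp_apply, pv_test_eq] at this
      exact this hcb
    · simp only [Option.map_some]
      obtain ⟨hp, hi0lt, hmin⟩ := pv_find_range hfind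
      rw [Function.comp_apply, pv_test_eq] at hp
      have hn1 : kk + 1 ≤ w0.toList.length := hkk
      have hm0 : pvM words w0.toList i0 = kk + 1 := by
        have h1 : kk + 1 ≤ pvM words w0.toList i0 :=
          le_pvM words w0.toList i0 (kk + 1) (by omega) hp
        have h2 := hcap i0
        omega
      right
      refine ⟨i0, by omega, by omega, ?_, fun i' _ => by have := hcap i'; omega,
        fun i' hi' => ?_⟩
      · rw [hm0, pvSub]
      · -- earlier starts have no common substring of length kk+1
        rw [hm0]
        by_contra hge
        rw [not_lt] at hge
        have heq : pvM words w0.toList i' = kk + 1 := by have := hcap i'; omega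
        have hcb' : pvCb words w0.toList i' (kk + 1) := by
          rw [← heq]; exact pvCb_pvM words w0.toList i'
        have hin' : kk + 1 ≤ w0.toList.length - i' := heq ▸ pvM_le words w0.toList i'
        have := hmin i' hi'
        rw [Function.comp_apply, pv_test_eq] at this
        rw [this] at hcb'
        exact absurd hcb' (by simp)

theorem pvInv_unique (words : List String) (w0 : String) (s s' : String)
    (h : pvInv words w0 w0.toList.length s) (h' : pvInv words w0 w0.toList.length s') :
    s = s' := by
  rcases h with ⟨rfl, hall⟩ | ⟨i1, hi1, hm1, hs1, hmax1, hstrict1⟩ <;>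
    rcases h' with ⟨rfl, hall'⟩ | ⟨i2, hi2, hm2, hs2, hmax2, hstrict2⟩
  · rfl
  · have := hall i2 hi2; omega
  · have := hall' i1 hi1; omega
  · have heq : pvM words w0.toList i1 = pvM words w0.toList i2 :=
      le_antisymm (hmax2 i1 hi1) (hmax1 i2 hi2)
    have hii : i1 = i2 := by
      rcases lt_trichotomy i1 i2 with h | h | h
      · have := hstrict2 i1 h; omega
      · exact h
      · have := hstrict1 i2 h; omega
    rw [hs1, hs2, heq, hii]

-- ===== VERDICT (by name: the statement is the Claim_ definition above) =====
theorem get_stem_spec : Claim_equal_get_stem := by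
  intro words _
  unfold Spec_get_stem
  cases words with
  | nil => rfl
  | cons w0 rest =>
    by_cases h0 : w0.toList.length = 0
    · have hw : w0 = "" := by
        apply String.ext
        simpa using List.length_eq_zero_iff.mp h0
      subst hw
      simp [get_stem, get_stem_alt]
    · have hn : 1 ≤ w0.toList.length := by omega
      have hlen : PySem.Str.len w0 ≠ 0 := by
        rw [PySem.Str.len_eq]; exact_mod_cast h0
      have hB : get_stem_alt (w0 :: rest)
          = pvAltScan (w0 :: rest) w0
              (PySem.List.pyRange ((w0.toList.length : Nat) : Int) 0 (-1)) := by
        rw [show get_stem_alt (w0 :: rest)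
            = if PySem.Str.len w0 = 0 then ""
              else pvAltScan (w0 :: rest) w0
                (PySem.List.pyRange (PySem.Str.len w0) 0 (-1)) from rfl,
          if_neg hlen, PySem.Str.len_eq]
      have hInvB : pvInv (w0 :: rest) w0 w0.toList.length (get_stem_alt (w0 :: rest)) := by
        rw [hB]
        exact pvB_scan (w0 :: rest) w0 w0.toList.length (le_refl _)
          (fun i => le_trans (pvM_le _ _ i) (by omega))
      by_cases h1 : rest = []
      · subst h1
        have hcb : pvCb [w0] w0.toList 0 w0.toList.length = true := by
          simp only [pvCb, List.all_cons, List.all_nil, Bool.and_true, List.drop_zero,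
            List.take_length]
          rw [PySem.Chars.isIn_iff_infix]
        have hm : pvM [w0] w0.toList 0 = w0.toList.length :=
          le_antisymm (pvM_le [w0] w0.toList 0)
            (le_pvM [w0] w0.toList 0 w0.toList.length (by omega) hcb)
        have hw0 : w0 = pvSub w0 0 (pvM [w0] w0.toList 0) := by
          apply String.ext
          rw [pvSub_toList, hm]
          simp
        have hInvA : pvInv [w0] w0 w0.toList.length w0 := by
          right
          exact ⟨0, by omega, by omega, hw0,
            fun i' _ => le_trans (pvM_le _ _ i') (by omega),
            fun i' hi' => absurd hi' (by omega)⟩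
        have hAval : get_stem [w0] = w0 := by
          simp [get_stem]
        rw [hAval]
        exact pvInv_unique [w0] w0 _ _ hInvA hInvB
      · have hl1 : ¬ rest.length + 1 = 1 := by
          intro h
          exact h1 (List.length_eq_zero_iff.mp (by omega))
        have hA : get_stem (w0 :: rest)
            = ((List.range w0.toList.length).map (fun (k : Nat) => (k : Int))).foldl
                (fun stem i =>
                  (PySem.List.pyRange 0 (PySem.Str.len w0 - i + 1) 1).foldl (fun stem j =>
                    if j > PySem.Str.len stem ∧
                        ((w0 :: rest).all (fun x =>
                          PySem.Str.isIn (PySem.Str.slice w0 (some i) (some (i + j))) x)) = true then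
                      PySem.Str.slice w0 (some i) (some (i + j))
                    else stem) stem) "" := by
          rw [get_stem]
          simp only [List.length_cons, List.headD_cons]
          rw [if_neg (by omega), if_neg hlen, if_neg hl1, PySem.Str.len_eq,
            PySem.List.pyRange_zero_nat]
        rw [hA]
        exact pvInv_unique (w0 :: rest) w0 _ _
          (pvA_outer (w0 :: rest) w0 w0.toList.length (le_refl _)) hInvB
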